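-- pv_equiv track=rewrite | github.com/MaksNemanja/POO_project | ai.py | map_de_poids
-- ===== SOURCE A (Python) =====
-- BLOCK_SIZE = 50
--
-- def map_de_poids(matrix,width, height,check_id,n):  #une methode qui me fait passer de ma matrice de string (matrix)
--     larg = height // (n * BLOCK_SIZE)                    #a une matrice de poids ou chaque block constituant ma map
--     long = width // (n * BLOCK_SIZE)                     #a son propre poid, va etre utiliser pour trouver le chemin
--     h = 0                                                # le moin resistif
--     poids = [[0] * long for _ in range(larg)]
--
--     for i in range(larg):  # lignes, les y
--         for j in range(long):  # colonnes, les x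
--             a = 0
--             for k in range(i * n, (i * n) + n):  # lignes, parcours les y
--                 for l in range(j * n, (j * n) + n):  # colonnes, les x
--                     h += 1
--                     if matrix[k][l] == 'G':
--                         a += 1
--
--                     elif matrix[k][l] == 'L':
--                         a+=2000
--
--                     elif matrix[k][l] == 'B':
--                         pass
--
--                     elif (matrix[k][l] == 'C' and check_id==0):
--                         a+=-20
--
--                     elif (matrix[k][l] == 'D' and check_id==1):
--                         a+=-20
--
--                     elif (matrix[k][l] == 'E' and check_id==2):
--                         a+=-20
--
--                     elif (matrix[k][l] == 'F' and check_id==3):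
--                         a+=-20
--
--             poids[i][j] = a
--
--     return poids
-- ===== SOURCE B (Python) =====
-- BLOCK_SIZE = 50
--
-- def map_de_poids(matrix, width, height, check_id, n):
--     # Column-scatter rewrite: one weight table built once from check_id, and the
--     # per-block (j, k, l) gather replaced by a single sweep over each map row that
--     # scatters every cell's weight into its block column l // n.
--     block = n * BLOCK_SIZE
--     larg = height // block
--     long = width // block
--     if n <= 0 or larg <= 0 or long <= 0:
--         # degenerate grid: no cell is ever visited, every weight is 0
--         return [[0] * long for _ in range(larg)]
--     w = {'G': 1, 'L': 2000}
--     if 0 <= check_id <= 3: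
--         w['CDEF'[check_id]] = -20
--     poids = []
--     for i in range(larg):
--         acc = [0] * long
--         for k in range(i * n, i * n + n):
--             for l in range(long * n):
--                 acc[l // n] += w.get(matrix[k][l], 0)
--         poids.append(acc)
--     return poids
-- ===== Notes on version B (the rewrite author's own statement) =====
-- stated objective: alternative
-- what changed: The per-block gather (4 nested loops with a local accumulator and a 7-way branch chain per cell) is replaced by a row sweep that scatters each cell's weight into its block column acc[l // n], with the weights held in a dict built once from check_id instead of re-testing check_id on every cell.
import Mathlib
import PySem

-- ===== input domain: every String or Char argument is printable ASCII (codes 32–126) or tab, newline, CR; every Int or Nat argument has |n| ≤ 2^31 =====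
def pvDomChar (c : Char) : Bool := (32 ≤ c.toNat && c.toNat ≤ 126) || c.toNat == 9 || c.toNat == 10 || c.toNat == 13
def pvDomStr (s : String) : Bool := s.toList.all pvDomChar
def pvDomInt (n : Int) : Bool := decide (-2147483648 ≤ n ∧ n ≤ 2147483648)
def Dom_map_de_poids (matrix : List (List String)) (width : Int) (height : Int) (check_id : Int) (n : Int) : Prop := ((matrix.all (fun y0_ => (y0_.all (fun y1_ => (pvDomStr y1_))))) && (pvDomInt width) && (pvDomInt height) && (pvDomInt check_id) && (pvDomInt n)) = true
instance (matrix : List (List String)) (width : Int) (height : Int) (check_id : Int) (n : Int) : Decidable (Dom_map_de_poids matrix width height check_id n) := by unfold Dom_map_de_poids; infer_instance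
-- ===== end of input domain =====

-- B replaces A's per-block gather (4 nested loops + a 7-way branch chain per cell) by a
-- row sweep that scatters each cell's weight (from a dict built once from check_id) into
-- its block column l // n; same return value, objective: alternative decomposition.

-- ===== PORT A =====
-- cell weight accumulation, the literal if/elif chain of A's inner loop body
def pvCellA (check_id : Int) (c : String) (a : Int) : Int :=
  if c = "G" then a + 1
  else if c = "L" then a + 2000
  else if c = "B" then a
  else if c = "C" ∧ check_id = 0 then a + (-20)
  else if c = "D" ∧ check_id = 1 then a + (-20)
  else if c = "E" ∧ check_id = 2 then a + (-20)
  else if c = "F" ∧ check_id = 3 then a + (-20)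
  else a

-- literal port of A; the local counter `h` (only ever incremented, never read) is omitted;
-- matrix[k][l] is pyGetD with defaults — on Pre_ every access is in range, as in Python.
def map_de_poids (matrix : List (List String)) (width : Int) (height : Int) (check_id : Int) (n : Int) : List (List Int) :=
  let larg := PySem.Int.floordiv height (n * 50)
  let long := PySem.Int.floordiv width (n * 50)
  let poids0 := (PySem.List.pyRange 0 larg 1).map (fun _ => List.replicate long.toNat (0 : Int))
  (PySem.List.pyRange 0 larg 1).foldl (fun poids i =>
    (PySem.List.pyRange 0 long 1).foldl (fun poids j =>
      let a := (PySem.List.pyRange (i * n) (i * n + n) 1).foldl (fun a k =>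
        (PySem.List.pyRange (j * n) (j * n + n) 1).foldl (fun a l =>
          pvCellA check_id (PySem.List.pyGetD (PySem.List.pyGetD matrix k []) l "") a) a) 0
      PySem.List.pySetD poids i (PySem.List.pySetD (PySem.List.pyGetD poids i []) j a)) poids) poids0

-- ===== PORT B =====
-- w = {'G': 1, 'L': 2000}; if 0 <= check_id <= 3: w['CDEF'[check_id]] = -20
-- (Python's 'CDEF'[check_id] is a 1-char string: Str.pyGet? gives the Char, String.singleton rebuilds it)
def pvWTable (check_id : Int) : PySem.Dict String Int :=
  let w := (PySem.Dict.empty.insert "G" 1).insert "L" 2000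
  if 0 ≤ check_id ∧ check_id ≤ 3 then
    w.insert (((PySem.Str.pyGet? "CDEF" check_id).map String.singleton).getD "") (-20)
  else w

def map_de_poids_alt (matrix : List (List String)) (width : Int) (height : Int) (check_id : Int) (n : Int) : List (List Int) :=
  let larg := PySem.Int.floordiv height (n * 50)
  let long := PySem.Int.floordiv width (n * 50)
  if n ≤ 0 ∨ larg ≤ 0 ∨ long ≤ 0 then
    -- degenerate grid: no cell is ever visited, every weight is 0
    (PySem.List.pyRange 0 larg 1).map (fun _ => List.replicate long.toNat (0 : Int))
  else
  let w := pvWTable check_id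
  (PySem.List.pyRange 0 larg 1).foldl (fun poids i =>
    let acc := List.replicate long.toNat (0 : Int)
    let acc := (PySem.List.pyRange (i * n) (i * n + n) 1).foldl (fun acc k =>
      (PySem.List.pyRange 0 (long * n) 1).foldl (fun acc l =>
        PySem.List.pySetD acc (PySem.Int.floordiv l n)
          (PySem.List.pyGetD acc (PySem.Int.floordiv l n) 0 +
            w.getD (PySem.List.pyGetD (PySem.List.pyGetD matrix k []) l "") 0)) acc) acc
    poids ++ [acc]) []

-- ===== PRECONDITION & SPEC =====
-- Pre_ excludes exactly the inputs where Python A raises: n = 0 (ZeroDivisionError) and,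
-- when the loops actually visit cells (n > 0 and both block dimensions positive), a matrix
-- with fewer than larg*n rows or a visited row with fewer than long*n cells (IndexError).
def Pre_map_de_poids (matrix : List (List String)) (width : Int) (height : Int) (check_id : Int) (n : Int) : Prop :=
  n ≠ 0 ∧
  (0 < n → 0 < PySem.Int.floordiv height (n * 50) → 0 < PySem.Int.floordiv width (n * 50) →
    (PySem.Int.floordiv height (n * 50) * n).toNat ≤ matrix.length ∧
    ∀ row ∈ matrix.take (PySem.Int.floordiv height (n * 50) * n).toNat,
      (PySem.Int.floordiv width (n * 50) * n).toNat ≤ row.length)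
instance (matrix : List (List String)) (width : Int) (height : Int) (check_id : Int) (n : Int) : Decidable (Pre_map_de_poids matrix width height check_id n) := by unfold Pre_map_de_poids; infer_instance

def pvWitness_map_de_poids : List (List String) × Int × Int × Int × Int :=
  ([["G", "C"], ["L", "B"]], 100, 100, 0, 2)

def Spec_map_de_poids (matrix : List (List String)) (width : Int) (height : Int) (check_id : Int) (n : Int) (out : List (List Int)) : Prop := out = map_de_poids_alt matrix width height check_id n
instance (matrix : List (List String)) (width : Int) (height : Int) (check_id : Int) (n : Int) (out : List (List Int)) : Decidable (Spec_map_de_poids matrix width height check_id n out) := by unfold Spec_map_de_poids; infer_instance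

-- ===== CLAIM (what is proved, stated in full; the proofs are below) =====
def Claim_equal_map_de_poids : Prop := ∀ (matrix : List (List String)) (width : Int) (height : Int) (check_id : Int) (n : Int), Dom_map_de_poids matrix width height check_id n → Pre_map_de_poids matrix width height check_id n → Spec_map_de_poids matrix width height check_id n (map_de_poids matrix width height check_id n)

-- ===== LEMMAS AND PROOFS =====

theorem map_de_poids_witness_ok :
    Dom_map_de_poids (pvWitness_map_de_poids.1) (pvWitness_map_de_poids.2.1) (pvWitness_map_de_poids.2.2.1) (pvWitness_map_de_poids.2.2.2.1) (pvWitness_map_de_poids.2.2.2.2) ∧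
    Pre_map_de_poids (pvWitness_map_de_poids.1) (pvWitness_map_de_poids.2.1) (pvWitness_map_de_poids.2.2.1) (pvWitness_map_de_poids.2.2.2.1) (pvWitness_map_de_poids.2.2.2.2) := by
  constructor <;> decide
-- A cell-access and weight abstractions shared by the proofs
def pvCell (matrix : List (List String)) (k l : Int) : String :=
  PySem.List.pyGetD (PySem.List.pyGetD matrix k []) l ""

def pvWt (ch : Int) (c : String) : Int :=
  if c = "G" then 1
  else if c = "L" then 2000
  else if c = "C" ∧ ch = 0 then -20
  else if c = "D" ∧ ch = 1 then -20
  else if c = "E" ∧ ch = 2 then -20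
  else if c = "F" ∧ ch = 3 then -20
  else 0

def pvColSum (matrix : List (List String)) (ch n k j : Int) : Int :=
  ((PySem.List.pyRange (j * n) (j * n + n) 1).map (fun l => pvWt ch (pvCell matrix k l))).sum

def pvS (matrix : List (List String)) (ch n i j : Int) : Int :=
  ((PySem.List.pyRange (i * n) (i * n + n) 1).map (fun k => pvColSum matrix ch n k j)).sum

def pvGrid (matrix : List (List String)) (ch n larg long : Int) : List (List Int) :=
  (PySem.List.pyRange 0 larg 1).map (fun i =>
    (PySem.List.pyRange 0 long 1).map (fun j => pvS matrix ch n i j))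

theorem pvCellA_eq (ch : Int) (c : String) (a : Int) : pvCellA ch c a = a + pvWt ch c := by
  unfold pvCellA pvWt
  split_ifs <;> simp_all

theorem pvWTable_getD (ch : Int) (c : String) : (pvWTable ch).getD c 0 = pvWt ch c := by
  unfold pvWTable pvWt
  by_cases h : 0 ≤ ch ∧ ch ≤ 3
  · have h4 : ch = 0 ∨ ch = 1 ∨ ch = 2 ∨ ch = 3 := by omega
    rcases h4 with rfl | rfl | rfl | rfl <;>
      simp only [h] <;>
      norm_num [PySem.Dict.getD_insert, PySem.Dict.getD_empty, PySem.Str.pyGet?] <;>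
      split_ifs <;>
      simp_all [show String.singleton 'C' = "C" from by decide,
        show String.singleton 'D' = "D" from by decide,
        show String.singleton 'E' = "E" from by decide,
        show String.singleton 'F' = "F" from by decide]
  · have h0 : ¬ ch = 0 := by omega
    have h1 : ¬ ch = 1 := by omega
    have h2 : ¬ ch = 2 := by omega
    have h3 : ¬ ch = 3 := by omega
    simp only [h]
    norm_num [PySem.Dict.getD_insert, PySem.Dict.getD_empty]
    split_ifs <;> simp_all

-- List.getD through List.set
theorem pv_getD_set_self {α : Type} (l : List α) (m : Nat) (v d : α) (h : m < l.length) :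
    (l.set m v).getD m d = v := by
  simp [List.getD_eq_getElem?_getD, List.getElem?_set_self h]

theorem pv_getD_set_ne {α : Type} (l : List α) (m j : Nat) (v d : α) (h : m ≠ j) :
    (l.set m v).getD j d = l.getD j d := by
  simp [List.getD_eq_getElem?_getD, List.getElem?_set_ne h]

-- range 0 L equals range 0 (L.toNat)
theorem pv_pyRange_zero_toNat (L : Int) :
    PySem.List.pyRange 0 L 1 = PySem.List.pyRange 0 ((L.toNat : Int)) 1 := by
  by_cases h : 0 ≤ L
  · rw [Int.toNat_of_nonneg h]
  · rw [PySem.List.pyRange_one_eq_nil (by omega), PySem.List.pyRange_one_eq_nil (by omega)]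

-- L3: a loop that repeatedly rewrites the single slot i is one write of the folded value
theorem pv_collapse {α : Type} (js : List Int) (f : α → Int → α) (d : α) :
    ∀ (p : List α) (i : Int), 0 ≤ i → i < (p.length : Int) →
    js.foldl (fun p j => PySem.List.pySetD p i (f (PySem.List.pyGetD p i d) j)) p =
      PySem.List.pySetD p i (js.foldl f (PySem.List.pyGetD p i d)) := by
  induction js with
  | nil =>
    intro p i h0 hl
    simp only [List.foldl_nil]
    rw [PySem.List.pySetD_of_nonneg _ _ h0,
      PySem.List.pyGetD_eq_getElem p d h0 (by omega), List.set_getElem_self]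
  | cons j t ih =>
    intro p i h0 hl
    simp only [List.foldl_cons]
    rw [ih _ i h0 (by rw [PySem.List.length_pySetD]; omega)]
    rw [PySem.List.pySetD_of_nonneg _ _ h0, PySem.List.pySetD_of_nonneg _ _ h0,
      PySem.List.pySetD_of_nonneg _ _ h0, List.set_set]
    congr 2
    rw [PySem.List.pyGetD_eq_getElem _ d h0 (by simp; omega),
      PySem.List.pyGetD_eq_getElem p d h0 (by omega)]
    exact List.getElem_set_self (h := by simp; omega)

-- L4: a loop over range(M) writing slot i (from its current value) at iteration i
theorem pv_foldl_set_range {α : Type} (d : α) (R : Int → α → α) (F : List α → Int → List α)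
    (hF : ∀ (p : List α) (i : Int), 0 ≤ i → i < (p.length : Int) →
      F p i = PySem.List.pySetD p i (R i (PySem.List.pyGetD p i d))) :
    ∀ (M : Nat) (p : List α), M ≤ p.length →
    ((PySem.List.pyRange 0 (M : Int) 1).foldl F p).length = p.length ∧
    ∀ (j : Nat), j < p.length →
      ((PySem.List.pyRange 0 (M : Int) 1).foldl F p).getD j d =
        if j < M then R (j : Int) (p.getD j d) else p.getD j d := by
  intro M
  induction M with
  | zero =>
    intro p hM
    rw [PySem.List.pyRange_one_eq_nil (by omega)]
    simp
  | succ M ih =>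
    intro p hM
    have hM' : M ≤ p.length := by omega
    obtain ⟨ihlen, ihget⟩ := ih p hM'
    have hsplit : PySem.List.pyRange 0 ((M + 1 : Nat) : Int) 1 =
        PySem.List.pyRange 0 (M : Int) 1 ++ [(M : Int)] := by
      push_cast
      exact PySem.List.pyRange_one_succ_right (by positivity)
    rw [hsplit, List.foldl_append, List.foldl_cons, List.foldl_nil]
    set q := (PySem.List.pyRange 0 (M : Int) 1).foldl F p with hq
    have hqM : q.getD M d = p.getD M d := by
      rw [ihget M (by omega)]; simp
    rw [hF q (M : Int) (by positivity) (by rw [ihlen]; omega)]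
    rw [PySem.List.pySetD_of_nonneg _ _ (by positivity), PySem.List.pyGetD_natCast,
      Int.toNat_natCast]
    constructor
    · rw [List.length_set, ihlen]
    · intro j hj
      by_cases hjM : j = M
      · subst hjM
        rw [pv_getD_set_self _ _ _ _ (by rw [ihlen]; omega), hqM]
        simp
      · rw [pv_getD_set_ne _ _ _ _ _ (fun h => hjM h.symm), ihget j hj]
        by_cases hlt : j < M
        · rw [if_pos hlt, if_pos (by omega)]
        · rw [if_neg hlt, if_neg (by omega)]

-- L1: elementwise characterisation of B's scatter loop acc[idx l] += f l
theorem pv_scatter_char (idx : Int → Int) (f : Int → Int) :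
    ∀ (js : List Int), (∀ l ∈ js, 0 ≤ idx l) → ∀ (acc : List Int),
    (js.foldl (fun acc l =>
        PySem.List.pySetD acc (idx l) (PySem.List.pyGetD acc (idx l) 0 + f l)) acc).length
      = acc.length ∧
    ∀ (j : Nat), j < acc.length →
      (js.foldl (fun acc l =>
        PySem.List.pySetD acc (idx l) (PySem.List.pyGetD acc (idx l) 0 + f l)) acc).getD j 0
      = acc.getD j 0 + ((js.filter (fun l => decide (idx l = (j : Int)))).map f).sum := by
  intro js
  induction js with
  | nil => intro _ acc; simp
  | cons l t ih =>
    intro hidx acc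
    have hl : 0 ≤ idx l := hidx l (List.mem_cons_self)
    simp only [List.foldl_cons]
    set acc' := PySem.List.pySetD acc (idx l) (PySem.List.pyGetD acc (idx l) 0 + f l) with hacc'
    have hlen' : acc'.length = acc.length := PySem.List.length_pySetD _ _ _
    obtain ⟨ihlen, ihget⟩ := ih (fun x hx => hidx x (List.mem_cons_of_mem _ hx)) acc'
    constructor
    · rw [ihlen, hlen']
    · intro j hj
      rw [ihget j (by omega)]
      by_cases hje : idx l = (j : Int)
      · have hj' : j = ((idx l).toNat) := by omega
        subst hj'
        have haccj : acc'.getD ((idx l).toNat) 0 = acc.getD ((idx l).toNat) 0 + f l := by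
          rw [hacc', PySem.List.pySetD_of_nonneg _ _ hl,
            pv_getD_set_self _ _ _ _ (by omega),
            PySem.List.pyGetD_eq_getElem acc 0 hl (by omega)]
          simp [List.getD_eq_getElem?_getD, List.getElem?_eq_getElem hj]
        rw [haccj, List.filter_cons_of_pos (by simpa using hje), List.map_cons, List.sum_cons]
        ring
      · have haccj : acc'.getD j 0 = acc.getD j 0 := by
          rw [hacc', PySem.List.pySetD_of_nonneg _ _ hl]
          exact pv_getD_set_ne _ _ _ _ _ (by omega)
        rw [haccj, List.filter_cons_of_neg (by simpa using hje)]

-- L2: a fold of elementwise-additive steps (on lists of a fixed length N) adds the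
-- per-step contributions
theorem pv_kfold_char (F : List Int → Int → List Int) (g : Int → Nat → Int) (N : Nat) :
    ∀ (ks : List Int),
    (∀ (acc : List Int) (k : Int), acc.length = N → k ∈ ks → (F acc k).length = acc.length ∧
      ∀ (j : Nat), j < acc.length → (F acc k).getD j 0 = acc.getD j 0 + g k j) →
    ∀ (acc : List Int), acc.length = N →
    (ks.foldl F acc).length = acc.length ∧
    ∀ (j : Nat), j < acc.length →
      (ks.foldl F acc).getD j 0 = acc.getD j 0 + (ks.map (fun k => g k j)).sum := by
  intro ks
  induction ks with
  | nil => intro _ acc _; simp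
  | cons k t ih =>
    intro hF acc hN
    simp only [List.foldl_cons]
    obtain ⟨hlen1, hget1⟩ := hF acc k hN (List.mem_cons_self)
    obtain ⟨ihlen, ihget⟩ := ih (fun a k' hN' hk' => hF a k' hN' (List.mem_cons_of_mem _ hk'))
      (F acc k) (by omega)
    constructor
    · rw [ihlen, hlen1]
    · intro j hj
      rw [ihget j (by omega), hget1 j hj, List.map_cons, List.sum_cons]
      ring

-- the cells of block column j are exactly the l with l // n = j
theorem pv_filter_block (n L : Int) (hn : 0 < n) (j : Nat) (hj : (j : Int) < L) :
    (PySem.List.pyRange 0 (L * n) 1).filter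
        (fun l => decide (PySem.Int.floordiv l n = (j : Int)))
      = PySem.List.pyRange ((j : Int) * n) ((j : Int) * n + n) 1 := by
  have h1 : (0 : Int) ≤ (j : Int) * n := by positivity
  have h2 : (j : Int) * n + n ≤ L * n := by nlinarith [Int.add_one_le_iff.mpr hj]
  rw [PySem.List.pyRange_one_append 0 ((j : Int) * n) (L * n) h1 (by omega),
    PySem.List.pyRange_one_append ((j : Int) * n) ((j : Int) * n + n) (L * n) (by omega) h2,
    List.filter_append, List.filter_append]
  have hfd : ∀ l : Int, PySem.Int.floordiv l n = (j : Int) ↔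
      (j : Int) * n ≤ l ∧ l < (j : Int) * n + n := by
    intro l
    rw [PySem.Int.floordiv_eq_iff_of_pos hn]
    constructor <;> intro ⟨a, b⟩ <;> constructor <;> nlinarith
  rw [List.filter_eq_nil_iff.mpr, List.filter_eq_self.mpr, List.filter_eq_nil_iff.mpr]
  · simp
  · intro l hl
    rw [PySem.List.mem_pyRange_one] at hl
    simp only [decide_eq_true_eq, hfd]
    omega
  · intro l hl
    rw [PySem.List.mem_pyRange_one] at hl
    simp only [decide_eq_true_eq, hfd]
    omega
  · intro l hl
    rw [PySem.List.mem_pyRange_one] at hl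
    simp only [decide_eq_true_eq, hfd]
    omega

-- A's inner double loop computes the block sum pvS
theorem pv_aA_eq (matrix : List (List String)) (ch n : Int) (i j : Int) :
    (PySem.List.pyRange (i * n) (i * n + n) 1).foldl (fun a k =>
      (PySem.List.pyRange (j * n) (j * n + n) 1).foldl (fun a l =>
        pvCellA ch (PySem.List.pyGetD (PySem.List.pyGetD matrix k []) l "") a) a) 0
    = pvS matrix ch n i j := by
  have hinner : ∀ (a k : Int),
      (PySem.List.pyRange (j * n) (j * n + n) 1).foldl (fun a l =>
        pvCellA ch (PySem.List.pyGetD (PySem.List.pyGetD matrix k []) l "") a) a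
      = a + pvColSum matrix ch n k j := by
    intro a k
    simp only [pvCellA_eq]
    rw [PySem.List.foldl_add]
    simp only [pvColSum, pvCell]
  simp only [hinner]
  rw [PySem.List.foldl_add]
  simp only [pvS, zero_add]

-- A's row: successive writes poids[i][j] = pvS i j on a zero row build the row of block sums
theorem pv_rowA (matrix : List (List String)) (ch n long : Int) (i : Int) :
    (PySem.List.pyRange 0 long 1).foldl
      (fun r j => PySem.List.pySetD r j (pvS matrix ch n i j))
      (List.replicate long.toNat (0 : Int))
    = (PySem.List.pyRange 0 long 1).map (fun j => pvS matrix ch n i j) := by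
  rw [pv_pyRange_zero_toNat long]
  obtain ⟨hlen, hget⟩ := pv_foldl_set_range (α := Int) 0 (fun j _ => pvS matrix ch n i j)
      (fun r j => PySem.List.pySetD r j (pvS matrix ch n i j))
      (fun p i' h0 h1 => rfl) long.toNat (List.replicate long.toNat 0) (by simp)
  apply List.ext_getElem
  · rw [hlen]; simp [PySem.List.length_pyRange_one]; omega
  · intro j h1 h2
    have hj : j < long.toNat := by
      simp [PySem.List.length_pyRange_one] at h2; omega
    rw [← List.getD_eq_getElem _ 0 h1, hget j (by simpa using hj),
      List.getElem_map, PySem.List.getElem_pyRange_one]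
    rw [if_pos hj]
    simp

-- Port A equals the grid of block sums
theorem pv_A_eq_grid (matrix : List (List String)) (w h ch n : Int) :
    map_de_poids matrix w h ch n =
      pvGrid matrix ch n (PySem.Int.floordiv h (n * 50)) (PySem.Int.floordiv w (n * 50)) := by
  simp only [map_de_poids]
  set larg := PySem.Int.floordiv h (n * 50) with hlarg
  set long := PySem.Int.floordiv w (n * 50) with hlong
  simp only [pv_aA_eq]
  have hcol : ∀ (p : List (List Int)) (i : Int), 0 ≤ i → i < (p.length : Int) →
      (PySem.List.pyRange 0 long 1).foldl
        (fun p j => PySem.List.pySetD p i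
          (PySem.List.pySetD (PySem.List.pyGetD p i []) j (pvS matrix ch n i j))) p
      = PySem.List.pySetD p i
          ((fun (i : Int) (r : List Int) => (PySem.List.pyRange 0 long 1).foldl
            (fun r j => PySem.List.pySetD r j (pvS matrix ch n i j)) r) i
            (PySem.List.pyGetD p i [])) :=
    fun p i h0 h1 => pv_collapse (PySem.List.pyRange 0 long 1)
      (fun r j => PySem.List.pySetD r j (pvS matrix ch n i j)) [] p i h0 h1
  rw [pv_pyRange_zero_toNat larg]
  obtain ⟨hlen, hget⟩ := pv_foldl_set_range (α := List Int) []
      (fun (i : Int) (r : List Int) => (PySem.List.pyRange 0 long 1).foldl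
        (fun r j => PySem.List.pySetD r j (pvS matrix ch n i j)) r)
      _ hcol larg.toNat
      ((PySem.List.pyRange 0 ((larg.toNat : Nat) : Int) 1).map
        (fun _ => List.replicate long.toNat (0 : Int)))
      (by simp [PySem.List.length_pyRange_one])
  apply List.ext_getElem
  · rw [hlen]
    simp [pvGrid, PySem.List.length_pyRange_one]
    omega
  · intro i h1 h2
    have hi : i < larg.toNat := by
      rw [hlen] at h1
      simp [PySem.List.length_pyRange_one] at h1
      omega
    rw [← List.getD_eq_getElem _ [] h1,
      hget i (by simp [PySem.List.length_pyRange_one]; omega), if_pos hi]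
    have hinit : ((PySem.List.pyRange 0 ((larg.toNat : Nat) : Int) 1).map
        (fun _ => List.replicate long.toNat (0 : Int))).getD i []
        = List.replicate long.toNat (0 : Int) := by
      rw [List.getD_eq_getElem _ _ (by simp [PySem.List.length_pyRange_one]; omega),
        List.getElem_map]
    rw [hinit, pv_rowA]
    simp only [pvGrid]
    rw [List.getElem_map, PySem.List.getElem_pyRange_one]
    simp

-- B's row sweep scatters the cells of block row i into the row of block sums
theorem pv_rowB (matrix : List (List String)) (ch n long : Int) (i : Int) :
    (PySem.List.pyRange (i * n) (i * n + n) 1).foldl (fun acc k =>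
      (PySem.List.pyRange 0 (long * n) 1).foldl (fun acc l =>
        PySem.List.pySetD acc (PySem.Int.floordiv l n)
          (PySem.List.pyGetD acc (PySem.Int.floordiv l n) 0 +
            (pvWTable ch).getD (PySem.List.pyGetD (PySem.List.pyGetD matrix k []) l "") 0)) acc)
      (List.replicate long.toNat (0 : Int))
    = (PySem.List.pyRange 0 long 1).map (fun j => pvS matrix ch n i j) := by
  have hF : ∀ (acc : List Int) (k : Int), acc.length = long.toNat →
      k ∈ PySem.List.pyRange (i * n) (i * n + n) 1 →
      ((PySem.List.pyRange 0 (long * n) 1).foldl (fun acc l =>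
        PySem.List.pySetD acc (PySem.Int.floordiv l n)
          (PySem.List.pyGetD acc (PySem.Int.floordiv l n) 0 +
            (pvWTable ch).getD (PySem.List.pyGetD (PySem.List.pyGetD matrix k []) l "") 0)) acc).length
        = acc.length ∧
      ∀ (j : Nat), j < acc.length →
        ((PySem.List.pyRange 0 (long * n) 1).foldl (fun acc l =>
          PySem.List.pySetD acc (PySem.Int.floordiv l n)
            (PySem.List.pyGetD acc (PySem.Int.floordiv l n) 0 +
              (pvWTable ch).getD (PySem.List.pyGetD (PySem.List.pyGetD matrix k []) l "") 0)) acc).getD j 0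
          = acc.getD j 0 + pvColSum matrix ch n k j := by
    intro acc k hN hk
    rw [PySem.List.mem_pyRange_one] at hk
    have hn : 0 < n := by omega
    obtain ⟨slen, sget⟩ := pv_scatter_char (fun l => PySem.Int.floordiv l n)
      (fun l => (pvWTable ch).getD (PySem.List.pyGetD (PySem.List.pyGetD matrix k []) l "") 0)
      (PySem.List.pyRange 0 (long * n) 1)
      (by
        intro l hl
        rw [PySem.List.mem_pyRange_one] at hl
        show 0 ≤ PySem.Int.floordiv l n
        rw [PySem.Int.floordiv_eq_ediv_of_pos hn]
        exact Int.ediv_nonneg hl.1 (le_of_lt hn)) acc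
    refine ⟨slen, fun j hj => ?_⟩
    rw [sget j hj]
    have hjlong : (j : Int) < long := by omega
    rw [pv_filter_block n long hn j hjlong]
    simp only [pvColSum, pvCell, pvWTable_getD]
  obtain ⟨hlen, hget⟩ := pv_kfold_char _ (fun k j => pvColSum matrix ch n k j) long.toNat
    (PySem.List.pyRange (i * n) (i * n + n) 1) hF
    (List.replicate long.toNat (0 : Int)) (by simp)
  apply List.ext_getElem
  · rw [hlen]
    simp [PySem.List.length_pyRange_one]
  · intro j h1 h2
    have hj : j < long.toNat := by
      rw [hlen] at h1
      simpa using h1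
    rw [← List.getD_eq_getElem _ 0 h1, hget j (by simpa using hj),
      List.getD_replicate _ hj, List.getElem_map, PySem.List.getElem_pyRange_one]
    simp only [pvS, zero_add]

-- Port B equals the grid of block sums
theorem pv_B_eq_grid (matrix : List (List String)) (w h ch n : Int) :
    map_de_poids_alt matrix w h ch n =
      pvGrid matrix ch n (PySem.Int.floordiv h (n * 50)) (PySem.Int.floordiv w (n * 50)) := by
  simp only [map_de_poids_alt]
  set larg := PySem.Int.floordiv h (n * 50) with hlarg
  set long := PySem.Int.floordiv w (n * 50) with hlong
  by_cases hdeg : n ≤ 0 ∨ larg ≤ 0 ∨ long ≤ 0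
  · rw [if_pos hdeg]
    simp only [pvGrid]
    apply List.map_congr_left
    intro i hi
    rw [PySem.List.mem_pyRange_one] at hi
    by_cases hlg : long ≤ 0
    · rw [PySem.List.pyRange_one_eq_nil (by omega)]
      simp [Int.toNat_of_nonpos hlg]
    · have hn : n ≤ 0 := by
        rcases hdeg with h | h | h
        · exact h
        · omega
        · omega
      have hS : ∀ j : Int, pvS matrix ch n i j = 0 := by
        intro j
        simp [pvS, PySem.List.pyRange_one_eq_nil (show i * n + n ≤ i * n by omega)]
      apply List.ext_getElem
      · simp [PySem.List.length_pyRange_one]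
      · intro j h1 h2
        rw [List.getElem_replicate, List.getElem_map, PySem.List.getElem_pyRange_one, hS]
  · rw [if_neg hdeg]
    rw [PySem.List.foldl_append_singleton_eq_map, List.nil_append]
    simp only [pvGrid]
    exact List.map_congr_left (fun i _ => pv_rowB matrix ch n long i)


-- ===== VERDICT (by name: the statement is the Claim_ definition above) =====
theorem map_de_poids_spec : Claim_equal_map_de_poids := by
  intro matrix width height check_id n _ _
  unfold Spec_map_de_poids
  rw [pv_A_eq_grid, pv_B_eq_grid]
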